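-- pv_equiv track=rewrite | github.com/wangzjpku/kicad-for-chrome | kicad-ai-auto/agent/design_rules/grounding_rules.py | _detect_circuit_type
-- ===== SOURCE A (Python) =====
-- from typing import Dict, List, Any, Optional
--
-- def _detect_circuit_type(components: List[Dict]) -> str:
--     """检测电路类型"""
--     has_adc = False
--     has_dac = False
--     has_mcu = False
--     has_motor_driver = False
--     has_rf = False
--     has_power_ic = False
--
--     for comp in components:
--         model = comp.get("model", "").lower()
--         name = comp.get("name", "").lower()
--
--         if any(x in model for x in ["adc", "ads1115", "mcp3008"]):
--             has_adc = True
--         if any(x in model for x in ["dac", "mcp4725", "pcm5"]):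
--             has_dac = True
--         if any(x in model for x in ["stm32", "atmega", "esp32", "attiny"]):
--             has_mcu = True
--         if any(x in model for x in ["l298", "tb6612", "drv88", "a4988"]):
--             has_motor_driver = True
--         if any(x in model for x in ["nrf24", "cc1101", "sx127", "rfm"]):
--             has_rf = True
--         if any(x in model for x in ["7805", "1117", "2596", "lm317", "uc384"]):
--             has_power_ic = True
--
--     if has_adc or has_dac:
--         return "mixed_signal"
--     if has_motor_driver:
--         return "motor_driver"
--     if has_rf:
--         return "rf_circuit"
--     if has_power_ic:
--         return "power_supply"
--     if has_mcu:
--         return "digital_only"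
--
--     return "digital_only"
-- ===== SOURCE B (Python) =====
-- from typing import Dict, List, Any, Optional
--
-- # Priority-ordered category table; mcu keywords are omitted because both the
-- # has_mcu branch and the fallthrough return "digital_only".
-- _CATEGORY_TABLE = [
--     ("mixed_signal", ["adc", "ads1115", "mcp3008", "dac", "mcp4725", "pcm5"]),
--     ("motor_driver", ["l298", "tb6612", "drv88", "a4988"]),
--     ("rf_circuit", ["nrf24", "cc1101", "sx127", "rfm"]),
--     ("power_supply", ["7805", "1117", "2596", "lm317", "uc384"]),
-- ]
--
-- def _detect_circuit_type(components: List[Dict]) -> str: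
--     """检测电路类型"""
--     for category, keywords in _CATEGORY_TABLE:
--         if any(k in comp.get("model", "").lower()
--                for comp in components for k in keywords):
--             return category
--     return "digital_only"
-- ===== Notes on version B (the rewrite author's own statement) =====
-- stated objective: simpler
-- what changed: Replaces the six boolean flags and the post-loop priority if-chain by a priority-ordered keyword table scanned with a single any() per category (early return on first match), dropping the mcu flag since both its branch and the fallthrough return digital_only.
import Mathlib
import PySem

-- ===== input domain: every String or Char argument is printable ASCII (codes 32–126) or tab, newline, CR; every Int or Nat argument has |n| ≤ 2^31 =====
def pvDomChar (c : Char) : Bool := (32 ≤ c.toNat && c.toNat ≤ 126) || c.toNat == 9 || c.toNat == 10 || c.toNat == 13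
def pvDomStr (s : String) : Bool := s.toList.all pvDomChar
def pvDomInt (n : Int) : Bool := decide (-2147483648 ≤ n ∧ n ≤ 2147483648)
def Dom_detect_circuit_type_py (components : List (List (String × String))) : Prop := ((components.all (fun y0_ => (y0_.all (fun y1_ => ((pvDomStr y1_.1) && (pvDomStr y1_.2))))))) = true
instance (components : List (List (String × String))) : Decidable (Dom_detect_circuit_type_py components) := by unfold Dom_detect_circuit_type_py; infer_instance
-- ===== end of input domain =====

-- B replaces A's six flags + post-loop if-chain by a priority-ordered keyword table scanned per category (simpler).

-- ===== PORT A =====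
def detect_circuit_type_py (components : List (List (String × String))) : String :=
  let st := components.foldl
    (fun (f : Bool × Bool × Bool × Bool × Bool × Bool) comp =>
      let model := PySem.Str.lower ((PySem.Dict.mk comp).getD "model" "")
      let _name := PySem.Str.lower ((PySem.Dict.mk comp).getD "name" "")
      let f1 := if ["adc", "ads1115", "mcp3008"].any (fun x => PySem.Str.isIn x model) then true else f.1
      let f2 := if ["dac", "mcp4725", "pcm5"].any (fun x => PySem.Str.isIn x model) then true else f.2.1
      let f3 := if ["stm32", "atmega", "esp32", "attiny"].any (fun x => PySem.Str.isIn x model) then true else f.2.2.1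
      let f4 := if ["l298", "tb6612", "drv88", "a4988"].any (fun x => PySem.Str.isIn x model) then true else f.2.2.2.1
      let f5 := if ["nrf24", "cc1101", "sx127", "rfm"].any (fun x => PySem.Str.isIn x model) then true else f.2.2.2.2.1
      let f6 := if ["7805", "1117", "2596", "lm317", "uc384"].any (fun x => PySem.Str.isIn x model) then true else f.2.2.2.2.2
      (f1, f2, f3, f4, f5, f6))
    (false, false, false, false, false, false)
  if st.1 || st.2.1 then "mixed_signal"
  else if st.2.2.2.1 then "motor_driver"
  else if st.2.2.2.2.1 then "rf_circuit"
  else if st.2.2.2.2.2 then "power_supply"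
  else if st.2.2.1 then "digital_only"
  else "digital_only"

-- ===== PORT B =====
def pvCategoryTable : List (String × List String) :=
  [("mixed_signal", ["adc", "ads1115", "mcp3008", "dac", "mcp4725", "pcm5"]),
   ("motor_driver", ["l298", "tb6612", "drv88", "a4988"]),
   ("rf_circuit", ["nrf24", "cc1101", "sx127", "rfm"]),
   ("power_supply", ["7805", "1117", "2596", "lm317", "uc384"])]

-- the 'for category, keywords in table: if any(...): return category' loop with early return
def pvScanTable (components : List (List (String × String))) : List (String × List String) → String
  | [] => "digital_only"
  | (category, keywords) :: rest =>
    if components.any (fun comp =>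
        keywords.any (fun k =>
          PySem.Str.isIn k (PySem.Str.lower ((PySem.Dict.mk comp).getD "model" "")))) then
      category
    else pvScanTable components rest

def detect_circuit_type_py_alt (components : List (List (String × String))) : String :=
  pvScanTable components pvCategoryTable

-- ===== PRECONDITION & SPEC =====
def Spec_detect_circuit_type_py (components : List (List (String × String))) (out : String) : Prop := out = detect_circuit_type_py_alt components
instance (components : List (List (String × String))) (out : String) : Decidable (Spec_detect_circuit_type_py components out) := by unfold Spec_detect_circuit_type_py; infer_instance

-- ===== CLAIM (what is proved, stated in full; the proofs are below) =====
def Claim_equal_detect_circuit_type_py : Prop := ∀ (components : List (List (String × String))), Dom_detect_circuit_type_py components → Spec_detect_circuit_type_py components (detect_circuit_type_py components)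

-- ===== LEMMAS AND PROOFS =====

-- match of keyword list kws against a component's lowered model
def pvHit (kws : List String) (comp : List (String × String)) : Bool :=
  kws.any (fun k => PySem.Str.isIn k (PySem.Str.lower ((PySem.Dict.mk comp).getD "model" "")))

lemma pvHit_eq (kws : List String) (comp : List (String × String)) :
    (kws.any (fun k => PySem.Str.isIn k (PySem.Str.lower ((PySem.Dict.mk comp).getD "model" "")))) = pvHit kws comp := rfl

lemma foldl_flags {α : Type} (l : List α) (p1 p2 p3 p4 p5 p6 : α → Bool) (a b c d e f : Bool) :
    l.foldl (fun (g : Bool × Bool × Bool × Bool × Bool × Bool) x =>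
        (p1 x || g.1, p2 x || g.2.1, p3 x || g.2.2.1,
         p4 x || g.2.2.2.1, p5 x || g.2.2.2.2.1, p6 x || g.2.2.2.2.2))
      (a, b, c, d, e, f)
    = (a || l.any p1, b || l.any p2, c || l.any p3, d || l.any p4, e || l.any p5, f || l.any p6) := by
  induction l generalizing a b c d e f with
  | nil => simp
  | cons hd tl ih =>
    simp only [List.foldl_cons, List.any_cons, ih]
    cases p1 hd <;> cases p2 hd <;> cases p3 hd <;> cases p4 hd <;> cases p5 hd <;> cases p6 hd <;>
      simp

lemma any_or {α : Type} (l : List α) (p q : α → Bool) :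
    l.any (fun x => p x || q x) = (l.any p || l.any q) := by
  induction l with
  | nil => simp
  | cons hd tl ih =>
    simp only [List.any_cons, ih]
    cases p hd <;> cases q hd <;> simp

lemma pvHit_append (k1 k2 : List String) (comp : List (String × String)) :
    pvHit (k1 ++ k2) comp = (pvHit k1 comp || pvHit k2 comp) := by
  simp [pvHit, List.any_append]

-- ===== VERDICT (by name: the statement is the Claim_ definition above) =====
theorem detect_circuit_type_py_spec : Claim_equal_detect_circuit_type_py := by
  intro components _
  show detect_circuit_type_py components = detect_circuit_type_py_alt components
  unfold detect_circuit_type_py detect_circuit_type_py_alt pvCategoryTable pvScanTable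
  simp only [pvHit_eq, Bool.if_true_left, Bool.decide_eq_true]
  simp only [foldl_flags, pvScanTable, pvHit_eq, Bool.false_or]
  have hmix : (components.any fun comp => pvHit ["adc", "ads1115", "mcp3008", "dac", "mcp4725", "pcm5"] comp)
      = (components.any (pvHit ["adc", "ads1115", "mcp3008"]) || components.any (pvHit ["dac", "mcp4725", "pcm5"])) := by
    have h1 : (fun comp => pvHit ["adc", "ads1115", "mcp3008", "dac", "mcp4725", "pcm5"] comp)
        = fun comp => pvHit ["adc", "ads1115", "mcp3008"] comp || pvHit ["dac", "mcp4725", "pcm5"] comp := by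
      funext comp
      exact pvHit_append ["adc", "ads1115", "mcp3008"] ["dac", "mcp4725", "pcm5"] comp
    rw [h1, any_or]
  simp only [hmix]
  cases h1 : components.any (pvHit ["adc", "ads1115", "mcp3008"]) <;>
  cases h2 : components.any (pvHit ["dac", "mcp4725", "pcm5"]) <;>
  cases h3 : components.any (pvHit ["stm32", "atmega", "esp32", "attiny"]) <;>
  cases h4 : components.any (pvHit ["l298", "tb6612", "drv88", "a4988"]) <;>
  cases h5 : components.any (pvHit ["nrf24", "cc1101", "sx127", "rfm"]) <;>
  cases h6 : components.any (pvHit ["7805", "1117", "2596", "lm317", "uc384"]) <;>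
    rfl
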